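-- pv_equiv track=rewrite | github.com/nsriniva/code-challenges | cuttings.py | check_cuts
-- ===== SOURCE A (Python) =====
-- def check_cuts(minLength: int, lengths: list) -> bool:
--
--     llen = len(lengths)
--     slen = sum(lengths)
--
--     if llen < 2:
--         return False
--
--     if llen == 2 and slen >= minLength:
--         return True
--
--     ret = check_cuts(minLength, lengths[1:])
--
--     if ret == False:
--         ret = check_cuts(minLength, lengths[: llen - 1])
--
--     return ret
-- ===== SOURCE B (Python) =====
-- def check_cuts(minLength: int, lengths: list) -> bool:
--     return any(x + y >= minLength for x, y in zip(lengths, lengths[1:]))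
-- ===== Notes on version B (the rewrite author's own statement) =====
-- stated objective: faster
-- what changed: Replaced the exponential double recursion on lengths[1:] and lengths[:-1] by a single linear scan over adjacent pairs (zip with the tail); intended as faster (A's recursion is exponential and timed out at n=64 in probes where B returned).
import Mathlib
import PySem

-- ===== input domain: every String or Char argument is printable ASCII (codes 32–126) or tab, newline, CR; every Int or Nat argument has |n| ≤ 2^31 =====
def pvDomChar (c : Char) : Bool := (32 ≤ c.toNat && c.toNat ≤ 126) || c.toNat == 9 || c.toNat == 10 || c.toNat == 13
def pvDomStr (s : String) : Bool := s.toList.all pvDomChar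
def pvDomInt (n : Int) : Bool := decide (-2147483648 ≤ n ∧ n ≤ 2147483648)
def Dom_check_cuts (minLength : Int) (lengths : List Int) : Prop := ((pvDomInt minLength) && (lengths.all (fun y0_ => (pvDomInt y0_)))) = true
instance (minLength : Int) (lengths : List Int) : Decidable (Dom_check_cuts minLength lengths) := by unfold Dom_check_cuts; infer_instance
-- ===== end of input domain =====

-- B replaces A's exponential double recursion by one linear scan over adjacent pairs;
-- intended as faster (a timing run saw A time out at n=64 where B returned).
-- ===== PORT A =====
def check_cuts (minLength : Int) (lengths : List Int) : Bool :=
  let llen : Int := lengths.length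
  let slen : Int := lengths.sum
  if llen < 2 then false
  else if llen = 2 ∧ slen ≥ minLength then true
  else
    let ret := check_cuts minLength (PySem.List.slice lengths (some 1) none)
    if ret = false then check_cuts minLength (PySem.List.slice lengths none (some (llen - 1)))
    else ret
termination_by lengths.length
decreasing_by
  · simp [PySem.List.slice_from_one]
    omega
  · rw [PySem.List.slice_to lengths (by omega : (0:Int) ≤ (lengths.length:Int) - 1)]
    simp
    omega

-- ===== PORT B =====
def check_cuts_alt (minLength : Int) (lengths : List Int) : Bool :=
  (lengths.zip lengths.tail).any (fun p => decide (p.1 + p.2 ≥ minLength))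

-- ===== PRECONDITION & SPEC =====
def Spec_check_cuts (minLength : Int) (lengths : List Int) (out : Bool) : Prop := out = check_cuts_alt minLength lengths
instance (minLength : Int) (lengths : List Int) (out : Bool) : Decidable (Spec_check_cuts minLength lengths out) := by unfold Spec_check_cuts; infer_instance

-- ===== CLAIM (what is proved, stated in full; the proofs are below) =====
def Claim_equal_check_cuts : Prop := ∀ (minLength : Int) (lengths : List Int), Dom_check_cuts minLength lengths → Spec_check_cuts minLength lengths (check_cuts minLength lengths)

-- ===== LEMMAS AND PROOFS =====

-- ===== VERDICT (by name: the statement is the Claim_ definition above) =====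
-- pairs of the dropLast are the dropLast of the pairs
theorem pv_pairs_dropLast (l : List Int) :
    l.dropLast.zip l.dropLast.tail = (l.zip l.tail).dropLast := by
  match l with
  | [] => simp
  | [x] => simp
  | x :: y :: rest =>
    match rest with
    | [] => simp
    | z :: r =>
      have ih := pv_pairs_dropLast (y :: z :: r)
      rw [show (x :: y :: z :: r).dropLast = x :: (y :: z :: r).dropLast from rfl]
      rw [show (y :: z :: r).dropLast = y :: (z :: r).dropLast from rfl] at ih ⊢
      simp only [List.tail_cons, List.zip_cons_cons] at ih ⊢
      rw [ih]
      cases h : ((y :: z :: r)).zip (z :: r) with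
      | nil => simp at h
      | cons a t => simp

theorem pv_any_dropLast (f : Int × Int → Bool) (xs : List (Int × Int))
    (h : xs.dropLast.any f = true) : xs.any f = true := by
  rw [List.any_eq_true] at *
  obtain ⟨x, hx, hf⟩ := h
  exact ⟨x, (List.dropLast_sublist xs).mem hx, hf⟩

-- if some adjacent pair of the tail fires, some adjacent pair of the list fires
theorem pv_any_tail (m : Int) (l : List Int)
    (h : check_cuts_alt m l.tail = true) : check_cuts_alt m l = true := by
  unfold check_cuts_alt at *
  match l with
  | [] => simp at h
  | [x] => simp at h
  | x :: y :: r =>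
    simp only [List.tail_cons, List.zip_cons_cons, List.any_cons] at h ⊢
    simp [h]

theorem pv_main (m : Int) (l : List Int) :
    check_cuts m l = check_cuts_alt m l := by
  induction l using check_cuts.induct (minLength := m) with
  | case1 l llen hlt =>
    have hlt' : ((l.length : Int)) < 2 := hlt
    unfold check_cuts check_cuts_alt
    rw [if_pos hlt]
    match l, hlt' with
    | [], _ => simp
    | [x], _ => simp
    | x :: y :: r, h => simp at h; omega
  | case2 l llen slen hge h2 =>
    have hge' : ¬ ((l.length : Int) < 2) := hge
    have h2' : ((l.length : Int)) = 2 ∧ l.sum ≥ m := h2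
    unfold check_cuts check_cuts_alt
    rw [if_neg hge, if_pos h2]
    match l, h2' with
    | [x, y], h2' =>
      simp only [List.sum_cons, List.sum_nil, add_zero] at h2'
      simp [h2'.2]
    | [], h2' => simp at h2'
    | [x], h2' => simp at h2'
    | x :: y :: z :: r, h2' => simp at h2'; omega
  | case3 l llen slen hge h2 ret hret ih1 ih2 =>
    have hge' : ¬ ((l.length : Int) < 2) := hge
    have h2' : ¬ (((l.length : Int)) = 2 ∧ l.sum ≥ m) := h2
    have hret' : check_cuts m (PySem.List.slice l (some 1) none) = false := hret
    have hlen2 : 2 ≤ l.length := by omega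
    unfold check_cuts
    rw [if_neg hge, if_neg h2, if_pos hret]
    rw [PySem.List.slice_from_one] at ih1 hret'
    rw [PySem.List.slice_to l (show (0:Int) ≤ (l.length:Int) - 1 by omega)] at ih2 ⊢
    have hto : (((l.length : Int) - 1).toNat) = l.length - 1 := by omega
    rw [hto, ← List.dropLast_eq_take] at ih2 ⊢
    have htail : check_cuts_alt m l.tail = false := by rw [← ih1]; exact hret'
    rw [ih2]
    match l, h2', htail, hlen2 with
    | [x, y], h2', htail, _ =>
      have hxy : ¬ (x + y ≥ m) := by
        simp only [List.length_cons, List.length_nil, List.sum_cons, List.sum_nil,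
          add_zero] at h2'
        push Not at h2'
        have := h2' (by norm_num)
        omega
      simp [check_cuts_alt, hxy]
    | x :: y :: z :: r, _, htail, _ =>
      simp only [List.tail_cons] at htail
      unfold check_cuts_alt at htail ⊢
      rw [pv_pairs_dropLast]
      simp only [List.tail_cons, List.zip_cons_cons, List.any_cons] at htail ⊢
      rw [Bool.or_eq_false_iff] at htail
      cases hf : decide (x + y ≥ m) with
      | true =>
        simp only [Bool.true_or]
        cases h : (y :: z :: r).zip (z :: r) with
        | nil => simp at h
        | cons a t => simp [hf]
      | false =>
        simp only [htail.1, htail.2, Bool.false_or]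
        apply Bool.eq_false_iff.mpr
        intro hh
        have := pv_any_dropLast _ _ hh
        simp only [List.any_cons, hf, htail.1, htail.2, Bool.false_or] at this
        exact Bool.false_ne_true this
  | case4 l llen slen hge h2 ret hret ih1 =>
    unfold check_cuts
    rw [if_neg hge, if_neg h2, if_neg hret]
    rw [PySem.List.slice_from_one] at ih1 ⊢
    have hret' : check_cuts m l.tail = true := by
      have : check_cuts m (PySem.List.slice l (some 1) none) ≠ false := hret
      rw [PySem.List.slice_from_one] at this
      simp only [ne_eq, Bool.not_eq_false] at this
      exact this
    rw [hret']
    rw [ih1] at hret'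
    exact (pv_any_tail m l hret').symm

theorem check_cuts_spec : Claim_equal_check_cuts := by
  intro m l _
  unfold Spec_check_cuts
  exact pv_main m l
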